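-- pv_equiv track=rewrite | github.com/C2-Q/C2Q | src/c2q-dataset/usability_comparison/problem_examples_usability/kcolor_qaoa.py | interpret_solution
-- ===== SOURCE A (Python) =====
-- def interpret_solution(bitstring, n, k):
--     color_map = {}
--     valid = True
--     for v in range(n):
--         colors = bitstring[v*k:(v+1)*k]
--         if colors.count('1') != 1:
--             valid = False
--         color_map[v] = colors.index('1') if '1' in colors else -1
--     return color_map, valid
-- ===== SOURCE B (Python) =====
-- def interpret_solution(bitstring, n, k):
--     # One flat pass over the bitstring instead of per-vertex slicing.
--     first = {}
--     counts = {}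
--     for i, c in enumerate(bitstring):
--         if c == '1':
--             v = i // k
--             counts[v] = counts.get(v, 0) + 1
--             if v not in first:
--                 first[v] = i % k
--     color_map = {v: first.get(v, -1) for v in range(n)}
--     valid = all(counts.get(v, 0) == 1 for v in range(n))
--     return color_map, valid
-- ===== Notes on version B (the rewrite author's own statement) =====
-- stated objective: alternative
-- what changed: B replaces A's per-vertex loop of slice/count/index passes by a single flat enumerate pass over the bitstring that records each vertex's first '1' position (i%k) and its count of '1's in dictionaries keyed by i//k, then assembles the color map and validity from those dictionaries.
-- outside the precondition, e.g. on interpret_solution('1', 2, 0): A returns ({0: -1, 1: -1}, False), B raises ZeroDivisionError; on interpret_solution('11', 1, -2): A returns ({0: -1}, False), B returns ({0: 0}, True)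
import Mathlib
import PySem

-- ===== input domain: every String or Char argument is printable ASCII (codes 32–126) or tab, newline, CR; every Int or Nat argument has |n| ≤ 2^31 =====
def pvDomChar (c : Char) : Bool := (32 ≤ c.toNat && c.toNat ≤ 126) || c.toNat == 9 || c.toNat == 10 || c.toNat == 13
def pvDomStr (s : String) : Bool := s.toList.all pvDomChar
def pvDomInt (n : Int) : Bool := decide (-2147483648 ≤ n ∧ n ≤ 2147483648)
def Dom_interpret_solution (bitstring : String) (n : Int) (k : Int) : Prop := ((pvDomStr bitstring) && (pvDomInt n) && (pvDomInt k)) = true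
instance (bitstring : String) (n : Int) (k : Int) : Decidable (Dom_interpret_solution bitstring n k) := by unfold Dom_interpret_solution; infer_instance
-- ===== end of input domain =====

-- B replaces A's per-vertex slicing by a single flat pass over the bitstring (objective: alternative
-- decomposition, one scan of the string plus dictionary lookups instead of n slice/count/index passes).

-- ===== PORT A =====
-- Python `colors.index('1')` is guarded by `'1' in colors`, so it equals `colors.find('1')` here.
def interpret_solution (bitstring : String) (n : Int) (k : Int) : (List (Int × Int)) × Bool :=
  let res := (PySem.List.pyRange 0 n 1).foldl
    (fun (st : PySem.Dict Int Int × Bool) v =>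
      let colors := PySem.Str.slice bitstring (some (v * k)) (some ((v + 1) * k))
      let valid := if PySem.Str.count colors "1" ≠ 1 then false else st.2
      (st.1.insert v (if PySem.Str.isIn "1" colors then PySem.Str.find colors "1" else -1), valid))
    (PySem.Dict.empty, true)
  (res.1.items, res.2)

-- ===== PORT B =====
def interpret_solution_alt (bitstring : String) (n : Int) (k : Int) : (List (Int × Int)) × Bool :=
  let st := (PySem.List.enumerate bitstring.toList 0).foldl
    (fun (st : PySem.Dict Int Int × PySem.Dict Int Int) p =>
      if p.2 == '1' then
        let v := PySem.Int.floordiv p.1 k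
        let counts := st.2.insert v (st.2.getD v 0 + 1)
        let first := if st.1.contains v then st.1 else st.1.insert v (PySem.Int.mod p.1 k)
        (first, counts)
      else st)
    (PySem.Dict.empty, PySem.Dict.empty)
  let color_map := (PySem.List.pyRange 0 n 1).map (fun v => (v, st.1.getD v (-1)))
  let valid := (PySem.List.pyRange 0 n 1).all (fun v => st.2.getD v 0 == 1)
  (color_map, valid)

-- ===== PRECONDITION & SPEC =====
-- Pre_ restricts to the natural domain k ≥ 1 (at least one color per vertex): for k ≤ 0 A's slices
-- bitstring[v*k:(v+1)*k] degenerate (empty or wrapping via negative bounds) while B's flat scan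
-- divides by k, so B raises for k = 0 and reads different blocks for k < 0.
def Pre_interpret_solution (bitstring : String) (n : Int) (k : Int) : Prop := 1 ≤ k
instance (bitstring : String) (n : Int) (k : Int) : Decidable (Pre_interpret_solution bitstring n k) := by unfold Pre_interpret_solution; infer_instance
def pvWitness_interpret_solution : String × Int × Int := ("0110", 2, 2)

def Spec_interpret_solution (bitstring : String) (n : Int) (k : Int) (out : (List (Int × Int)) × Bool) : Prop := out = interpret_solution_alt bitstring n k
instance (bitstring : String) (n : Int) (k : Int) (out : (List (Int × Int)) × Bool) : Decidable (Spec_interpret_solution bitstring n k out) := by unfold Spec_interpret_solution; infer_instance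

-- ===== CLAIM (what is proved, stated in full; the proofs are below) =====
def Claim_equal_interpret_solution : Prop := ∀ (bitstring : String) (n : Int) (k : Int), Dom_interpret_solution bitstring n k → Pre_interpret_solution bitstring n k → Spec_interpret_solution bitstring n k (interpret_solution bitstring n k)

-- ===== LEMMAS AND PROOFS =====

-- the block of the bitstring that A inspects for vertex v
def pvBlk (cs : List Char) (k v : Int) : List Char :=
  PySem.List.slice cs (some (v * k)) (some ((v + 1) * k))

-- A's per-vertex color value, on the char-list side
def pvValA (cs : List Char) (k v : Int) : Int :=
  if PySem.Chars.isIn ['1'] (pvBlk cs k v) then PySem.Chars.find (pvBlk cs k v) ['1'] else -1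

-- A's per-vertex validity bit
def pvOkA (cs : List Char) (k v : Int) : Bool := PySem.Chars.count (pvBlk cs k v) ['1'] == 1

-- B's loop body
def pvStepB (k : Int) (st : PySem.Dict Int Int × PySem.Dict Int Int) (p : Int × Char) :
    PySem.Dict Int Int × PySem.Dict Int Int :=
  if p.2 == '1' then
    let v := PySem.Int.floordiv p.1 k
    let counts := st.2.insert v (st.2.getD v 0 + 1)
    let first := if st.1.contains v then st.1 else st.1.insert v (PySem.Int.mod p.1 k)
    (first, counts)
  else st

-- the positions B attributes to vertex v
def pvP (k v : Int) (p : Int × Char) : Bool := p.2 == '1' && (PySem.Int.floordiv p.1 k == v)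

theorem pvFoldA (bitstring : String) (k : Int) (l : List Int) (d : PySem.Dict Int Int) (b : Bool) :
    l.foldl
      (fun (st : PySem.Dict Int Int × Bool) v =>
        let colors := PySem.Str.slice bitstring (some (v * k)) (some ((v + 1) * k))
        let valid := if PySem.Str.count colors "1" ≠ 1 then false else st.2
        (st.1.insert v (if PySem.Str.isIn "1" colors then PySem.Str.find colors "1" else -1), valid))
      (d, b)
    = (l.foldl (fun d v => d.insert v (pvValA bitstring.toList k v)) d,
       b && l.all (fun v => pvOkA bitstring.toList k v)) := by
  induction l generalizing d b with
  | nil => simp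
  | cons v t ih =>
    simp only [List.foldl_cons, List.all_cons, ih]
    have h1 : (if PySem.Str.isIn "1" (PySem.Str.slice bitstring (some (v * k)) (some ((v + 1) * k))) then
        PySem.Str.find (PySem.Str.slice bitstring (some (v * k)) (some ((v + 1) * k))) "1" else -1)
        = pvValA bitstring.toList k v := by
      simp [pvValA, pvBlk, PySem.Str.isIn, PySem.Str.find]
    have h2 : (if PySem.Str.count (PySem.Str.slice bitstring (some (v * k)) (some ((v + 1) * k))) "1" ≠ 1 then false else b)
        = (b && pvOkA bitstring.toList k v) := by
      simp only [pvOkA, pvBlk, PySem.Str.count]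
      by_cases h : PySem.Chars.count (PySem.Str.slice bitstring (some (v * k)) (some ((v + 1) * k))).toList ['1'] = 1
      · simp_all
      · simp_all
    rw [h1, h2, Bool.and_assoc]

theorem pvFoldB_counts (k : Int) (l : List (Int × Char)) (f c : PySem.Dict Int Int) (v : Int) :
    ((l.foldl (pvStepB k) (f, c)).2).getD v 0 = c.getD v 0 + (l.countP (pvP k v) : Int) := by
  induction l generalizing f c with
  | nil => simp
  | cons p t ih =>
    simp only [List.foldl_cons, List.countP_cons, pvP, pvStepB]
    by_cases h1 : p.2 = '1'
    · simp only [h1, beq_self_eq_true, if_pos, Bool.true_and]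
      rw [ih]
      by_cases h2 : PySem.Int.floordiv p.1 k = v
      · simp [h2, PySem.Dict.getD_insert_self]; ring
      · simp [h2, PySem.Dict.getD_insert_of_ne _ _ _ (Ne.symm h2)]
    · simp [h1, ih]

theorem pvFoldB_first (k : Int) (l : List (Int × Char)) (f c : PySem.Dict Int Int) (v : Int) :
    ((l.foldl (pvStepB k) (f, c)).1).get? v
      = (f.get? v).or (((l.filter (pvP k v)).head?).map (fun p => PySem.Int.mod p.1 k)) := by
  induction l generalizing f c with
  | nil => simp
  | cons p t ih =>
    simp only [List.foldl_cons, List.filter_cons, pvP, pvStepB]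
    by_cases h1 : p.2 = '1'
    · simp only [h1, beq_self_eq_true, if_pos, Bool.true_and]
      rw [ih]
      by_cases h2 : PySem.Int.floordiv p.1 k = v
      · simp only [h2, beq_self_eq_true, if_pos, List.head?_cons, Option.map_some]
        by_cases h3 : f.contains v = true
        · have hs : (f.get? v).isSome := by
            rw [← PySem.Dict.contains_eq_isSome_get?]
            exact h3
          rcases Option.isSome_iff_exists.mp hs with ⟨w, hw⟩
          simp [h3, hw]
        · have hnone : f.get? v = none :=
            (PySem.Dict.get?_eq_none_iff_contains f v).mpr (by simpa using h3)
          simp [h3, hnone, PySem.Dict.get?_insert_self]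
      · have hne : v ≠ PySem.Int.floordiv p.1 k := Ne.symm h2
        simp only [beq_iff_eq, if_neg h2]
        by_cases h3 : f.contains (PySem.Int.floordiv p.1 k) = true
        · simp [h3]
        · simp [h3, PySem.Dict.get?_insert_of_ne _ _ hne]
    · simp [h1, ih]

-- single-character `sub` facts about PySem.Chars.count / find
theorem pvCountGoSingleton (c : Char) (fuel : Nat) (l : List Char) (acc : Nat)
    (h : l.length ≤ fuel) : PySem.Chars.count.go [c] fuel l acc = acc + l.count c := by
  induction fuel generalizing l acc with
  | zero =>
    have : l = [] := List.length_eq_zero_iff.mp (Nat.le_zero.mp h)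
    subst this
    rw [PySem.Chars.count.go.eq_def]
    simp
  | succ fuel ih =>
    rw [PySem.Chars.count.go.eq_def]
    cases l with
    | nil => simp
    | cons hd t =>
      by_cases hc : c = hd
      · have : [c].isPrefixOf (hd :: t) = true := by simp [List.isPrefixOf, hc]
        simp only [this, if_pos]
        rw [ih _ _ (by simpa using Nat.le_of_succ_le_succ (by simpa using h))]
        simp [hc]
        omega
      · have : [c].isPrefixOf (hd :: t) = false := by simp [List.isPrefixOf, hc]
        simp only [this]
        rw [if_neg (by simp)]
        rw [ih _ _ (by simpa using Nat.le_of_succ_le_succ (by simpa using h))]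
        simp [Ne.symm hc]

theorem pvCountSingleton (c : Char) (l : List Char) : PySem.Chars.count l [c] = l.count c := by
  rw [PySem.Chars.count]
  simp [pvCountGoSingleton c l.length l 0 le_rfl]

theorem pvSingletonPrefix (c : Char) (l : List Char) : [c] <+: l ↔ l.head? = some c := by
  cases l with
  | nil => simp
  | cons hd t => constructor
                 · intro h
                   rcases h with ⟨s, hs⟩
                   simp at hs
                   simp [hs.1]
                 · intro h
                   simp at h
                   exact ⟨t, by simp [h]⟩

theorem pvFindSingleton (c : Char) (l : List Char) (h : c ∈ l) :
    l.idxOf? c = some (PySem.Chars.find l [c]).toNat := by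
  have h0 : 0 ≤ PySem.Chars.find l [c] :=
    (PySem.Chars.find_nonneg_iff l [c]).mpr ((List.singleton_infix_iff c l).mpr h)
  obtain ⟨hpre, hmin⟩ := PySem.Chars.find_spec h0
  set t := (PySem.Chars.find l [c]).toNat with ht
  have hth : (l.drop t).head? = some c := (pvSingletonPrefix c _).mp hpre
  have ht2 : l[t]? = some c := by rw [← List.head?_drop]; exact hth
  rw [List.getElem?_eq_some_iff] at ht2
  rcases ht2 with ⟨hlen, hval⟩
  rw [List.idxOf?_eq_some_iff]
  refine ⟨hlen, hval, ?_⟩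
  intro j hj hc
  apply hmin j hj
  rw [pvSingletonPrefix, List.head?_drop]
  rw [List.getElem?_eq_getElem (by omega), hc]

theorem pvValAChar (cs : List Char) (k v : Int) :
    pvValA cs k v = ((pvBlk cs k v).idxOf? '1').elim (-1) (fun j => (j : Int)) := by
  unfold pvValA
  by_cases hmem : '1' ∈ pvBlk cs k v
  · have hin : PySem.Chars.isIn ['1'] (pvBlk cs k v) = true :=
      (PySem.Chars.isIn_iff_infix _ _).mpr ((List.singleton_infix_iff _ _).mpr hmem)
    have h0 : 0 ≤ PySem.Chars.find (pvBlk cs k v) ['1'] :=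
      (PySem.Chars.find_nonneg_iff _ _).mpr ((List.singleton_infix_iff _ _).mpr hmem)
    rw [hin, if_pos rfl, pvFindSingleton '1' _ hmem]
    simp
    omega
  · have hin : PySem.Chars.isIn ['1'] (pvBlk cs k v) = false := by
      rw [PySem.Chars.isIn_eq_false_iff]
      intro hcon
      exact hmem ((List.singleton_infix_iff _ _).mp hcon)
    rw [hin]
    simp [List.idxOf?_eq_none_iff.mpr hmem]

-- filtered enumerate of a block
theorem pvEnumFilterLen (bl : List Char) (s : Int) :
    ((PySem.List.enumerate bl s).filter (fun p => p.2 == '1')).length = bl.count '1' := by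
  induction bl generalizing s with
  | nil => simp [PySem.List.enumerate_nil]
  | cons hd t ih =>
    rw [PySem.List.enumerate_cons, List.filter_cons]
    by_cases hc : hd = '1'
    · simp [hc, ih]
    · simp [hc, ih, List.count_cons, Ne.symm hc]

theorem pvEnumFilterHead (bl : List Char) (s : Int) :
    ((PySem.List.enumerate bl s).filter (fun p => p.2 == '1')).head?
      = (bl.idxOf? '1').map (fun j => (s + (j : Int), '1')) := by
  induction bl generalizing s with
  | nil => simp [PySem.List.enumerate_nil]
  | cons hd t ih =>
    rw [PySem.List.enumerate_cons, List.filter_cons, List.idxOf?_cons]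
    by_cases hc : hd = '1'
    · simp [hc]
    · have : (hd == '1') = false := by simp [hc]
      simp only [this, Bool.false_eq_true, if_false]
      rw [ih]
      cases hj : t.idxOf? '1' with
      | none => simp
      | some j =>
        simp only [Option.map_some, Option.bind_eq_bind, Option.bind_some, Option.pure_def,
          Option.some.injEq, Prod.mk.injEq, and_true]
        push_cast
        ring

-- the central decomposition: what B's flat filter sees for vertex v is exactly A's block
theorem pvBlkEq (cs : List Char) (k v : Int) (hk : 0 < k) (hv : 0 ≤ v) :
    pvBlk cs k v = (cs.drop (v * k).toNat).take k.toNat := by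
  unfold pvBlk
  rw [PySem.List.slice_toNat cs (by positivity) (by positivity)]
  congr 1
  have h1 : (0:Int) ≤ v * k := by positivity
  have h2 : (v + 1) * k = v * k + k := by ring
  omega

theorem pvFilterEnum (cs : List Char) (k v : Int) (hk : 0 < k) (hv : 0 ≤ v) :
    (PySem.List.enumerate cs 0).filter (pvP k v)
      = ((PySem.List.enumerate (pvBlk cs k v) (v * k)).filter (fun p => p.2 == '1')) := by
  have h1 : (0:Int) ≤ v * k := by positivity
  have hvk1 : (v + 1) * k = v * k + k := by ring
  set a := (v * k).toNat with ha
  set m := k.toNat with hm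
  have hacast : ((a : Int)) = v * k := by omega
  have hmcast : ((m : Int)) = k := by omega
  have hblk : pvBlk cs k v = (cs.drop a).take m := pvBlkEq cs k v hk hv
  by_cases hA : a ≤ cs.length
  · have hlt : (cs.take a).length = a := by simp [List.length_take]; omega
    have hsplit : cs.take a ++ ((cs.drop a).take m ++ cs.drop (a + m)) = cs := by
      rw [← List.append_assoc, ← List.take_add, List.take_append_drop]
    conv_lhs => rw [← hsplit]
    rw [PySem.List.enumerate_append, PySem.List.enumerate_append, List.filter_append,
      List.filter_append, hlt]
    have hlen2 : ((cs.drop a).take m).length ≤ m := by simp [List.length_take]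
    have hF1 : (PySem.List.enumerate (cs.take a) 0).filter (pvP k v) = [] := by
      rw [List.filter_eq_nil_iff]
      intro p hp
      rw [PySem.List.mem_enumerate_iff] at hp
      obtain ⟨j, hj, rfl⟩ := hp
      simp only [pvP, Bool.and_eq_true, beq_iff_eq, not_and]
      intro _
      rw [PySem.Int.floordiv_eq_iff_of_pos hk]
      rw [hlt] at hj
      intro hcon
      omega
    have hF2 : ((PySem.List.enumerate ((cs.drop a).take m) ((0:Int) + ↑a)).filter (pvP k v))
        = ((PySem.List.enumerate ((cs.drop a).take m) ((0:Int) + ↑a)).filter (fun p => p.2 == '1')) := by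
      apply List.filter_congr
      intro p hp
      rw [PySem.List.mem_enumerate_iff] at hp
      obtain ⟨j, hj, rfl⟩ := hp
      have hfd : PySem.Int.floordiv ((a:Int) + ↑j) k = v := by
        rw [PySem.Int.floordiv_eq_iff_of_pos hk]
        constructor <;> omega
      simp [pvP, hfd]
    have hF3 : ((PySem.List.enumerate (cs.drop (a + m))
        ((0:Int) + ↑a + ↑((cs.drop a).take m).length)).filter (pvP k v)) = [] := by
      rw [List.filter_eq_nil_iff]
      intro p hp
      rw [PySem.List.mem_enumerate_iff] at hp
      obtain ⟨j, hj, rfl⟩ := hp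
      have hlen3 : (cs.drop (a + m)).length = cs.length - (a + m) := by simp
      have hmm : ((cs.drop a).take m).length = m := by
        simp only [List.length_take, List.length_drop]
        omega
      simp only [pvP, Bool.and_eq_true, beq_iff_eq, not_and]
      intro _
      rw [PySem.Int.floordiv_eq_iff_of_pos hk]
      rw [hmm]
      intro hcon
      omega
    rw [hF1, hF2, hF3, hblk, hacast]
    simp
  · have hdrop : cs.drop a = [] := by
      rw [List.drop_eq_nil_iff]
      omega
    have hblk2 : pvBlk cs k v = [] := by rw [hblk, hdrop]; simp
    rw [hblk2, PySem.List.enumerate_nil, List.filter_nil]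
    rw [List.filter_eq_nil_iff]
    intro p hp
    rw [PySem.List.mem_enumerate_iff] at hp
    obtain ⟨j, hj, rfl⟩ := hp
    simp only [pvP, Bool.and_eq_true, beq_iff_eq, not_and]
    intro _
    rw [PySem.Int.floordiv_eq_iff_of_pos hk]
    intro hcon
    omega

theorem pvCountsAgree (cs : List Char) (k v : Int) (hk : 0 < k) (hv : 0 ≤ v) :
    ((PySem.List.enumerate cs 0).countP (pvP k v) : Int)
      = ((pvBlk cs k v).count '1' : Int) := by
  rw [List.countP_eq_length_filter, pvFilterEnum cs k v hk hv, pvEnumFilterLen]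

theorem pvFirstAgree (cs : List Char) (k v : Int) (hk : 0 < k) (hv : 0 ≤ v) :
    (((PySem.List.enumerate cs 0).filter (pvP k v)).head?).map (fun p => PySem.Int.mod p.1 k)
      = ((pvBlk cs k v).idxOf? '1').map (fun j => (j : Int)) := by
  rw [pvFilterEnum cs k v hk hv, pvEnumFilterHead]
  cases hj : (pvBlk cs k v).idxOf? '1' with
  | none => rfl
  | some j =>
    have hjlt : j < (pvBlk cs k v).length := by
      rw [List.idxOf?_eq_some_iff] at hj
      exact hj.1
    have hjk : (j : Int) < k := by
      rw [pvBlkEq cs k v hk hv] at hjlt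
      have := List.length_take_le k.toNat (cs.drop (v * k).toNat)
      omega
    simp only [Option.bind_eq_bind, Option.bind_some, Option.pure_def, Option.map_some,
      Option.some.injEq]
    rw [PySem.Int.mod_eq_emod_of_pos hk]
    have : v * k + (j : Int) = (j : Int) + v * k := by ring
    rw [this, Int.add_mul_emod_self_right]
    exact Int.emod_eq_of_lt (by positivity) hjk

theorem pvAllCongr (l : List Int) (p q : Int → Bool) (h : ∀ x ∈ l, p x = q x) :
    l.all p = l.all q := by
  induction l with
  | nil => rfl
  | cons a t ih =>
    simp only [List.all_cons]
    rw [h a (by simp), ih (fun x hx => h x (by simp [hx]))]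

theorem pvBeqNatInt (a : Nat) : (((a : Int)) == (1 : Int)) = (a == 1) := by
  by_cases h : a = 1 <;> simp [h]

-- ===== VERDICT (by name: the statement is the Claim_ definition above) =====
theorem interpret_solution_spec : Claim_equal_interpret_solution := by
  intro bitstring n k _ hk
  have hk0 : (0 : Int) < k := hk
  unfold Spec_interpret_solution interpret_solution interpret_solution_alt
  rw [pvFoldA bitstring k]
  have hst : ((PySem.List.enumerate bitstring.toList 0).foldl
      (fun (st : PySem.Dict Int Int × PySem.Dict Int Int) p =>
        if p.2 == '1' then
          let v := PySem.Int.floordiv p.1 k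
          let counts := st.2.insert v (st.2.getD v 0 + 1)
          let first := if st.1.contains v then st.1 else st.1.insert v (PySem.Int.mod p.1 k)
          (first, counts)
        else st)
      (PySem.Dict.empty, PySem.Dict.empty))
      = (PySem.List.enumerate bitstring.toList 0).foldl (pvStepB k)
          (PySem.Dict.empty, PySem.Dict.empty) := rfl
  rw [hst]
  have hitems := PySem.Dict.items_foldl_insert_fresh (PySem.List.pyRange 0 n 1)
    (fun (v : Int) => v) (fun v => pvValA bitstring.toList k v) PySem.Dict.empty
    (fun a _ => PySem.Dict.contains_empty a)
    (by simpa using PySem.List.nodup_pyRange_one 0 n)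
  simp only [Prod.mk.injEq]
  constructor
  · rw [hitems]
    apply List.map_congr_left
    intro v hv
    have hv0 : 0 ≤ v := (PySem.List.mem_pyRange_one.mp hv).1
    simp only [Prod.mk.injEq, true_and]
    rw [PySem.Dict.getD_eq_get?_getD, pvFoldB_first, PySem.Dict.get?_empty, Option.none_or,
      pvFirstAgree bitstring.toList k v hk0 hv0, pvValAChar]
    cases (pvBlk bitstring.toList k v).idxOf? '1' <;> rfl
  · rw [Bool.true_and]
    apply pvAllCongr
    intro v hv
    have hv0 : 0 ≤ v := (PySem.List.mem_pyRange_one.mp hv).1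
    rw [pvFoldB_counts, PySem.Dict.getD_empty, zero_add,
      pvCountsAgree bitstring.toList k v hk0 hv0, pvBeqNatInt]
    unfold pvOkA
    rw [pvCountSingleton]
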